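-- pv_equiv track=rewrite | github.com/ijdiaz17/ONLINE_DS_THEBRIDGE_IGNACIO | Hundir la flota/utils.py | superposicion_barcos
-- ===== SOURCE A (Python) =====
-- def superposicion_barcos(uno, dos, tres, cuatro, cinco, seis):
--     posiciones = []
--     for barco in [uno, dos, tres, cuatro, cinco, seis]:
--         for fila, columna in barco:
--             if [fila, columna] in posiciones:
--                 return False
--             posiciones.append([fila, columna])
--     return True
-- ===== SOURCE B (Python) =====
-- def superposicion_barcos(uno, dos, tres, cuatro, cinco, seis):
--     posiciones = [(fila, columna)
--                   for barco in (uno, dos, tres, cuatro, cinco, seis)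
--                   for fila, columna in barco]
--     return len(posiciones) == len(set(posiciones))
-- ===== Notes on version B (the rewrite author's own statement) =====
-- stated objective: simpler
-- what changed: Replaces the incremental scan with per-position membership test and early return by one flat aggregation of all positions followed by a count-vs-distinct-count comparison.
import Mathlib
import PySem

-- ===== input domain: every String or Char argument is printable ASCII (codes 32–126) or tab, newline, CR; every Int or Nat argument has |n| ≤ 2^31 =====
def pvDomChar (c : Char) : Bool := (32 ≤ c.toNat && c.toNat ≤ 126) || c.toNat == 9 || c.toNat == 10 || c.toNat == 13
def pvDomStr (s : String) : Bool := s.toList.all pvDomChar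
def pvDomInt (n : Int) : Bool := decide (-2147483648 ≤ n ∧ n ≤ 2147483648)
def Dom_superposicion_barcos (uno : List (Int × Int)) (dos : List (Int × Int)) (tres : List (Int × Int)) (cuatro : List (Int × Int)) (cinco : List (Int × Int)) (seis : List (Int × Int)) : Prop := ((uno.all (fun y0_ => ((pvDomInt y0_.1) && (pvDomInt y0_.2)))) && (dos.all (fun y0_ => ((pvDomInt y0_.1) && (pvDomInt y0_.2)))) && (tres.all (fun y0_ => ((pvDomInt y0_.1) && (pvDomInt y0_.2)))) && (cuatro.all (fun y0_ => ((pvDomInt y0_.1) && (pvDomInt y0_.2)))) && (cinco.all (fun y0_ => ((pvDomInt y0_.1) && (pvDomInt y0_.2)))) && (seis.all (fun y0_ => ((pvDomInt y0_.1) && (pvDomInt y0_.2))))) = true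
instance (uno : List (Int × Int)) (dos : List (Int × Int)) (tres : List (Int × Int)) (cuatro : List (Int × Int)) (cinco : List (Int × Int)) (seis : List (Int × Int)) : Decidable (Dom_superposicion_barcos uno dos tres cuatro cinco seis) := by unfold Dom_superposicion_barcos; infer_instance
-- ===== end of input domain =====

-- B replaces A's incremental scan with early return by one flat aggregation and a
-- count-vs-distinct-count comparison (objective: simpler).

-- ===== PORT A =====
-- inner loop 'for fila, columna in barco': membership test against 'posiciones', early False
def shipLoop (acc : List (Int × Int)) : List (Int × Int) → Option (List (Int × Int))
  | [] => some acc
  | p :: rest => if p ∈ acc then none else shipLoop (acc ++ [p]) rest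

-- outer loop 'for barco in [uno, …, seis]'
def fleetLoop (acc : List (Int × Int)) : List (List (Int × Int)) → Bool
  | [] => true
  | b :: bs =>
    match shipLoop acc b with
    | none => false
    | some acc' => fleetLoop acc' bs

def superposicion_barcos (uno : List (Int × Int)) (dos : List (Int × Int)) (tres : List (Int × Int)) (cuatro : List (Int × Int)) (cinco : List (Int × Int)) (seis : List (Int × Int)) : Bool :=
  fleetLoop [] [uno, dos, tres, cuatro, cinco, seis]

-- ===== PORT B =====
def superposicion_barcos_alt (uno : List (Int × Int)) (dos : List (Int × Int)) (tres : List (Int × Int)) (cuatro : List (Int × Int)) (cinco : List (Int × Int)) (seis : List (Int × Int)) : Bool :=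
  let posiciones := [uno, dos, tres, cuatro, cinco, seis].flatMap (fun barco => barco)
  posiciones.length == (PySem.Set.ofList posiciones).length

-- ===== PRECONDITION & SPEC =====
def Spec_superposicion_barcos (uno : List (Int × Int)) (dos : List (Int × Int)) (tres : List (Int × Int)) (cuatro : List (Int × Int)) (cinco : List (Int × Int)) (seis : List (Int × Int)) (out : Bool) : Prop := out = superposicion_barcos_alt uno dos tres cuatro cinco seis
instance (uno : List (Int × Int)) (dos : List (Int × Int)) (tres : List (Int × Int)) (cuatro : List (Int × Int)) (cinco : List (Int × Int)) (seis : List (Int × Int)) (out : Bool) : Decidable (Spec_superposicion_barcos uno dos tres cuatro cinco seis out) := by unfold Spec_superposicion_barcos; infer_instance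

-- ===== CLAIM (what is proved, stated in full; the proofs are below) =====
def Claim_equal_superposicion_barcos : Prop := ∀ (uno : List (Int × Int)) (dos : List (Int × Int)) (tres : List (Int × Int)) (cuatro : List (Int × Int)) (cinco : List (Int × Int)) (seis : List (Int × Int)), Dom_superposicion_barcos uno dos tres cuatro cinco seis → Spec_superposicion_barcos uno dos tres cuatro cinco seis (superposicion_barcos uno dos tres cuatro cinco seis)

-- ===== LEMMAS AND PROOFS =====

lemma shipLoop_spec (b : List (Int × Int)) (acc : List (Int × Int)) (h : acc.Nodup) :
    shipLoop acc b = if (acc ++ b).Nodup then some (acc ++ b) else none := by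
  induction b generalizing acc with
  | nil => simp [shipLoop, h]
  | cons p rest ih =>
    by_cases hp : p ∈ acc
    · have : ¬ (acc ++ p :: rest).Nodup := by
        intro hc
        rcases List.disjoint_of_nodup_append hc hp with h2
        simp at h2
      simp [shipLoop, hp, this]
    · have h' : (acc ++ [p]).Nodup := by
        simp [List.nodup_append, h]
        intro a b hab hq; exact hp (hq ▸ hab)
      rw [shipLoop, if_neg hp, ih _ h']
      simp [List.append_assoc]

lemma fleetLoop_spec (ships : List (List (Int × Int))) (acc : List (Int × Int)) (h : acc.Nodup) :
    fleetLoop acc ships = decide (acc ++ ships.flatten).Nodup := by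
  induction ships generalizing acc with
  | nil => simp [fleetLoop, h]
  | cons b bs ih =>
    rw [fleetLoop, shipLoop_spec _ _ h]
    by_cases hn : (acc ++ b).Nodup
    · rw [if_pos hn]
      show fleetLoop (acc ++ b) bs = _
      rw [ih _ hn]
      simp [List.append_assoc]
    · rw [if_neg hn]
      have : ¬ (acc ++ (b :: bs).flatten).Nodup := by
        intro hc
        have hc' : ((acc ++ b) ++ bs.flatten).Nodup := by simpa [List.append_assoc] using hc
        exact hn (hc'.sublist (List.sublist_append_left _ _))
      simpa using this

lemma add_len_le (s : List (Int × Int)) (x : Int × Int) :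
    (PySem.Set.add s x).length ≤ s.length + 1 := by
  by_cases hx : x ∈ s
  · simp [PySem.Set.add, PySem.Set.contains, hx]
  · simp [PySem.Set.add, PySem.Set.contains, hx]

lemma foldl_add_len_le (l s : List (Int × Int)) :
    (l.foldl PySem.Set.add s).length ≤ s.length + l.length := by
  induction l generalizing s with
  | nil => simp
  | cons x l ih =>
    simp only [List.foldl_cons, List.length_cons]
    have := ih (PySem.Set.add s x)
    have := add_len_le s x
    omega

lemma foldl_add_len_eq_iff (l s : List (Int × Int)) :
    (l.foldl PySem.Set.add s).length = s.length + l.length ↔ (l.Nodup ∧ ∀ x ∈ l, x ∉ s) := by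
  induction l generalizing s with
  | nil => simp
  | cons x l ih =>
    simp only [List.foldl_cons]
    by_cases hx : x ∈ s
    · have hadd : PySem.Set.add s x = s := by simp [PySem.Set.add, PySem.Set.contains, hx]
      rw [hadd]
      constructor
      · intro hlen
        exfalso
        have h1 := foldl_add_len_le l s
        simp only [List.length_cons] at hlen
        omega
      · rintro ⟨_, hall⟩
        exact absurd hx (hall x (by simp))
    · have hadd : PySem.Set.add s x = s ++ [x] := by simp [PySem.Set.add, PySem.Set.contains, hx]
      rw [hadd, List.length_cons,
        show s.length + (l.length + 1) = (s ++ [x]).length + l.length by simp; omega, ih]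
      simp only [List.nodup_cons, List.mem_cons, List.mem_append, List.not_mem_nil, or_false]
      constructor
      · rintro ⟨hnd, hall⟩
        push Not at hall
        refine ⟨⟨fun hxl => (hall x hxl).2 rfl, hnd⟩, ?_⟩
        rintro y (rfl | hy)
        · exact hx
        · exact (hall y hy).1
      · rintro ⟨⟨hxl, hnd⟩, hall⟩
        refine ⟨hnd, fun y hy => ?_⟩
        rintro (hys | rfl)
        · exact (hall y (Or.inr hy)) hys
        · exact hxl hy

lemma alt_eq_nodup (l : List (Int × Int)) :
    (l.length == (PySem.Set.ofList l).length) = decide l.Nodup := by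
  have hof : PySem.Set.ofList l = l.foldl PySem.Set.add [] := PySem.Set.ofList_eq_foldl l
  rw [hof]
  by_cases h : l.Nodup
  · have h1 : (l.foldl PySem.Set.add []).length = List.length ([] : List (Int × Int)) + l.length :=
      (foldl_add_len_eq_iff l []).mpr ⟨h, by simp⟩
    simp only [List.length_nil, Nat.zero_add] at h1
    simp [h1, h]
  · have hne : (l.foldl PySem.Set.add []).length ≠ l.length := by
      intro hc
      exact h ((foldl_add_len_eq_iff l []).mp (by simpa using hc)).1
    have hne' : l.length ≠ (l.foldl PySem.Set.add []).length := fun hc => hne hc.symm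
    simp [h, hne']

-- ===== VERDICT (by name: the statement is the Claim_ definition above) =====
theorem superposicion_barcos_spec : Claim_equal_superposicion_barcos := by
  intro uno dos tres cuatro cinco seis _
  unfold Spec_superposicion_barcos superposicion_barcos superposicion_barcos_alt
  rw [fleetLoop_spec _ _ List.nodup_nil, alt_eq_nodup]
  simp
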